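-- pv_equiv track=rewrite | github.com/taohou01/LvlsetPersCyc | filtration.py | find_components_with_sigmabetaminus1_in_boundary
-- ===== SOURCE A (Python) =====
-- def find_components_with_sigmabetaminus1_in_boundary(connected_components, the_edge):
--     ret = []
--     for component in connected_components:
--         boundary = computeBoundary(component)
--         if tuple(the_edge) in boundary:
--             ret.append(1)
--         else:
--             ret.append(0)
--
--     return ret
--
-- def computeBoundary(A):
--     #allSimplices = A.get_simplices()
--     #edgesWithoutFiltration = meshHelpers.removeFiltration(allSimplices)
--     #allEdges = meshHelpers.getEdges(edgesWithoutFiltration)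
--
--     #edges_in_A = [simplex for simplex in A if len(simplex) == 2]        # filter edges
--     #triangles_in_A = [simplex for simplex in A if len(simplex) == 3]    # filter triangles
--
--     #edges_dict = { tuple(edge): False for edge in edges_in_A }
--
--     edges_set = set()
--     for triangle in A:
--
--         assert (len(triangle) == 3)       # ensures A is strictly a triangle set
--
--         e0 = (triangle[0], triangle[1])
--         e1 = (triangle[0], triangle[2])
--         e2 = (triangle[1], triangle[2])
--
--         if e0 in edges_set:
--             edges_set.remove(e0)
--         else:
--             edges_set.add(e0)
--
--         if e1 in edges_set:
--             edges_set.remove(e1)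
--         else:
--             edges_set.add(e1)
--
--         if e2 in edges_set:
--             edges_set.remove(e2)
--         else:
--             edges_set.add(e2)
--
--     #Bret = [item for item in edges_set if edges_set[item] == True]
--     return edges_set
-- ===== SOURCE B (Python) =====
-- def find_components_with_sigmabetaminus1_in_boundary(connected_components, the_edge):
--     target = tuple(the_edge)
--     ret = []
--     for component in connected_components:
--         cnt = 0
--         for triangle in component:
--             assert (len(triangle) == 3)
--             if (triangle[0], triangle[1]) == target:
--                 cnt += 1
--             if (triangle[0], triangle[2]) == target:
--                 cnt += 1
--             if (triangle[1], triangle[2]) == target: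
--                 cnt += 1
--         ret.append(cnt % 2)
--     return ret
-- ===== Notes on version B (the rewrite author's own statement) =====
-- stated objective: faster
-- what changed: B drops the per-component symmetric-difference edge-set construction entirely and instead counts, in one pass over each component's triangles, how many of the three oriented triangle edges equal the queried edge, appending that count mod 2.
import Mathlib
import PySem

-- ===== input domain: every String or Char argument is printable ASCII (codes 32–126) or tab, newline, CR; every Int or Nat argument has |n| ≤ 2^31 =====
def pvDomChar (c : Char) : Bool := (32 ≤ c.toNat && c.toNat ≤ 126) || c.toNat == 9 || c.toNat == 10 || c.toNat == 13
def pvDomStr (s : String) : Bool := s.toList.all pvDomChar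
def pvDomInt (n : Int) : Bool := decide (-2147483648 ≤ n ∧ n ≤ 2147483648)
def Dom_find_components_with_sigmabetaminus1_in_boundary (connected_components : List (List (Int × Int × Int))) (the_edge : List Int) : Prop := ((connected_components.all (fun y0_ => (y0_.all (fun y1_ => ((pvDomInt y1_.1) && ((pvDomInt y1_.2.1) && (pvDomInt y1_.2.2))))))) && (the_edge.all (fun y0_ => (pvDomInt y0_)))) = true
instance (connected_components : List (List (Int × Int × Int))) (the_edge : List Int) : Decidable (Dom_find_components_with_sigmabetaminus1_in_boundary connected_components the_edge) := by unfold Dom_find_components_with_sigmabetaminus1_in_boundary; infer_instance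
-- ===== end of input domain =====

-- B replaces A's per-component symmetric-difference edge-set construction by a direct
-- parity count of how often the queried edge occurs among the triangles' edges (alternative decomposition).

-- ===== PORT A =====
-- Python's 'if e in s: s.remove(e) else: s.add(e)' toggle
def pvToggle (s : PySem.Set (Int × Int)) (e : Int × Int) : PySem.Set (Int × Int) :=
  if PySem.Set.contains s e then PySem.Set.discard s e else PySem.Set.add s e

-- computeBoundary: triangles are 3-tuples by type, so 'assert len(triangle)==3' always passes
def computeBoundary (A : List (Int × Int × Int)) : PySem.Set (Int × Int) :=
  A.foldl (fun s t =>
    pvToggle (pvToggle (pvToggle s (t.1, t.2.1)) (t.1, t.2.2)) (t.2.1, t.2.2))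
    PySem.Set.empty

-- 'tuple(the_edge) in boundary': a length-n tuple equals a pair only when n = 2 and both match (exact)
def pvEdgeMem (b : PySem.Set (Int × Int)) (the_edge : List Int) : Bool :=
  match the_edge with
  | [x, y] => PySem.Set.contains b (x, y)
  | _ => false

def find_components_with_sigmabetaminus1_in_boundary (connected_components : List (List (Int × Int × Int))) (the_edge : List Int) : List Int :=
  connected_components.foldl (fun ret component =>
    ret ++ [if pvEdgeMem (computeBoundary component) the_edge then 1 else 0]) []

-- ===== PORT B =====
def pvCount (the_edge : List Int) (component : List (Int × Int × Int)) : Int :=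
  component.foldl (fun cnt t =>
    ((cnt + (if the_edge = [t.1, t.2.1] then 1 else 0))
         + (if the_edge = [t.1, t.2.2] then 1 else 0))
         + (if the_edge = [t.2.1, t.2.2] then 1 else 0)) 0

def find_components_with_sigmabetaminus1_in_boundary_alt (connected_components : List (List (Int × Int × Int))) (the_edge : List Int) : List Int :=
  connected_components.foldl (fun ret component =>
    ret ++ [PySem.Int.mod (pvCount the_edge component) 2]) []

-- ===== PRECONDITION & SPEC =====
def Spec_find_components_with_sigmabetaminus1_in_boundary (connected_components : List (List (Int × Int × Int))) (the_edge : List Int) (out : List Int) : Prop := out = find_components_with_sigmabetaminus1_in_boundary_alt connected_components the_edge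
instance (connected_components : List (List (Int × Int × Int))) (the_edge : List Int) (out : List Int) : Decidable (Spec_find_components_with_sigmabetaminus1_in_boundary connected_components the_edge out) := by unfold Spec_find_components_with_sigmabetaminus1_in_boundary; infer_instance

-- ===== CLAIM (what is proved, stated in full; the proofs are below) =====
def Claim_equal_find_components_with_sigmabetaminus1_in_boundary : Prop := ∀ (connected_components : List (List (Int × Int × Int))) (the_edge : List Int), Dom_find_components_with_sigmabetaminus1_in_boundary connected_components the_edge → Spec_find_components_with_sigmabetaminus1_in_boundary connected_components the_edge (find_components_with_sigmabetaminus1_in_boundary connected_components the_edge)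

-- ===== LEMMAS AND PROOFS =====

theorem pvToggle_contains (s : PySem.Set (Int × Int)) (e x : Int × Int) :
    PySem.Set.contains (pvToggle s e) x
      = if x = e then !(PySem.Set.contains s x) else PySem.Set.contains s x := by
  unfold pvToggle
  by_cases hc : e ∈ s <;> by_cases hx : x = e <;>
    subst_vars <;>
    simp [hc, PySem.Set.contains_eq_listContains, PySem.Set.mem_discard,
          PySem.Set.mem_add] <;>

    simp [hx]

-- per-component invariant: membership in the toggled set equals the parity of the match count
set_option maxHeartbeats 2000000 in
theorem pv_component_inv (x y : Int) :
    ∀ (ts : List (Int × Int × Int)) (s : PySem.Set (Int × Int)),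
      PySem.Set.contains
        (ts.foldl (fun s t =>
          pvToggle (pvToggle (pvToggle s (t.1, t.2.1)) (t.1, t.2.2)) (t.2.1, t.2.2)) s)
        (x, y)
      = xor (PySem.Set.contains s (x, y)) (decide (pvCount [x, y] ts % 2 = 1)) := by
  intro ts
  induction ts with
  | nil => intro s; simp [pvCount]
  | cons t rest ih =>
    obtain ⟨ta, tb, tc⟩ := t
    intro s
    have hshift :
        pvCount [x, y] (⟨ta, tb, tc⟩ :: rest)
        = (((0 + (if ([x,y] : List Int) = [ta, tb] then 1 else 0))
             + (if ([x,y] : List Int) = [ta, tc] then 1 else 0))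
             + (if ([x,y] : List Int) = [tb, tc] then 1 else 0)) + pvCount [x, y] rest := by
      unfold pvCount
      simp only [List.foldl_cons]
      generalize ((((0:Int) + _) + _) + _) = c
      rw [show (fun cnt (t : Int × Int × Int) =>
          ((cnt + (if ([x,y] : List Int) = [t.1, t.2.1] then (1:Int) else 0))
               + (if ([x,y] : List Int) = [t.1, t.2.2] then 1 else 0))
               + (if ([x,y] : List Int) = [t.2.1, t.2.2] then 1 else 0))
        = (fun acc t => acc + (((if ([x,y] : List Int) = [t.1, t.2.1] then (1:Int) else 0)
               + (if ([x,y] : List Int) = [t.1, t.2.2] then 1 else 0))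
               + (if ([x,y] : List Int) = [t.2.1, t.2.2] then 1 else 0))) from by
          funext acc t; ring]
      rw [PySem.List.foldl_add, PySem.List.foldl_add]
      ring
    simp only [List.foldl_cons]
    rw [ih, hshift]
    simp only [pvToggle_contains]
    have e0 : (([x,y] : List Int) = [ta, tb]) ↔ (((x,y) : Int × Int) = (ta, tb)) := by
      simp [Prod.ext_iff]
    have e1 : (([x,y] : List Int) = [ta, tc]) ↔ (((x,y) : Int × Int) = (ta, tc)) := by
      simp [Prod.ext_iff]
    have e2 : (([x,y] : List Int) = [tb, tc]) ↔ (((x,y) : Int × Int) = (tb, tc)) := by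
      simp [Prod.ext_iff]
    by_cases h0 : (((x,y)) : Int × Int) = (ta, tb) <;>
      by_cases h1 : (((x,y)) : Int × Int) = (ta, tc) <;>
      by_cases h2 : (((x,y)) : Int × Int) = (tb, tc) <;>
      rcases Int.emod_two_eq_zero_or_one (pvCount [x, y] rest) with hp2 | hp2 <;>
      cases hb : PySem.Set.contains s (x, y) <;>
      simp [e0, e1, e2, h0, h1, h2, hb, Int.add_emod, hp2] <;>
      by_cases hab : ta = tb <;> by_cases hbc : tb = tc <;> by_cases hac : ta = tc <;>
      simp_all

theorem pvCount_nonneg (e : List Int) (ts : List (Int × Int × Int)) : 0 ≤ pvCount e ts := by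
  unfold pvCount
  induction ts using List.reverseRecOn with
  | nil => simp
  | append_singleton rest t ih =>
    simp only [List.foldl_append, List.foldl_cons, List.foldl_nil] at *
    split_ifs <;> omega

theorem pvCount_no_match (e : List Int) (h : ∀ x y : Int, e ≠ [x, y])
    (ts : List (Int × Int × Int)) : pvCount e ts = 0 := by
  unfold pvCount
  induction ts using List.reverseRecOn with
  | nil => simp
  | append_singleton rest t ih =>
    simp only [List.foldl_append, List.foldl_cons, List.foldl_nil] at *
    rw [ih]
    simp [h t.1 t.2.1, h t.1 t.2.2, h t.2.1 t.2.2]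

theorem pv_mod_two (n : Int) (_hn : 0 ≤ n) :
    PySem.Int.mod n 2 = if n % 2 = 1 then 1 else 0 := by
  rw [PySem.Int.mod_eq_emod_of_pos (by omega)]
  omega

theorem pv_col_eq (the_edge : List Int) (component : List (Int × Int × Int)) :
    (if pvEdgeMem (computeBoundary component) the_edge then (1:Int) else 0)
      = PySem.Int.mod (pvCount the_edge component) 2 := by
  rw [pv_mod_two _ (pvCount_nonneg the_edge component)]
  match he : the_edge with
  | [x, y] =>
    have hmem : pvEdgeMem (computeBoundary component) [x, y]
        = PySem.Set.contains (computeBoundary component) (x, y) := rfl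
    rw [hmem]
    unfold computeBoundary
    rw [pv_component_inv x y component PySem.Set.empty]
    have hz : PySem.Set.contains PySem.Set.empty ((x, y) : Int × Int) = false := rfl
    rw [hz]
    by_cases hp : pvCount [x, y] component % 2 = 1 <;> simp [hp]
  | [] =>
    rw [pvCount_no_match [] (by intro a b h; simp at h)]
    simp [pvEdgeMem]
  | [x] =>
    rw [pvCount_no_match [x] (by intro a b h; simp at h)]
    simp [pvEdgeMem]
  | x :: y :: z :: r =>
    rw [pvCount_no_match (x :: y :: z :: r) (by intro a b h; simp at h)]
    simp [pvEdgeMem]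

theorem pv_main_eq (connected_components : List (List (Int × Int × Int))) (the_edge : List Int) :
    find_components_with_sigmabetaminus1_in_boundary connected_components the_edge
      = find_components_with_sigmabetaminus1_in_boundary_alt connected_components the_edge := by
  unfold find_components_with_sigmabetaminus1_in_boundary
         find_components_with_sigmabetaminus1_in_boundary_alt
  induction connected_components using List.reverseRecOn with
  | nil => rfl
  | append_singleton rest c ih =>
    simp only [List.foldl_append, List.foldl_cons, List.foldl_nil]
    rw [ih, pv_col_eq]

-- ===== VERDICT (by name: the statement is the Claim_ definition above) =====
theorem find_components_with_sigmabetaminus1_in_boundary_spec : Claim_equal_find_components_with_sigmabetaminus1_in_boundary := by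
  intro cc the_edge _
  exact pv_main_eq cc the_edge
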